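-- pv_equiv track=rewrite | github.com/hungnguyenkhanh-bit/LMS | DB/sample_data.py | enumerate_semesters
-- ===== SOURCE A (Python) =====
-- def enumerate_semesters(entrance_year: int, last_year: int = 2025, last_term: int = 1) -> list[str]:
--     """
--     Sinh danh sách học kỳ từ entrance_year-1 đến last_year-last_term.
--     Giả định 1 năm có 3 kỳ: 1, 2, 3 (YYYY-1/2/3).
--
--     VD: entrance_year = 2022, last_year=2025, last_term=1
--       -> ['2022-1', '2022-2', '2022-3', '2023-1', ..., '2025-1']
--     """
--     semesters: list[str] = []
--
--     if entrance_year > last_year: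
--         return semesters
--
--     for year in range(entrance_year, last_year + 1):
--         for term in (1, 2, 3):
--             if year == last_year and term > last_term:
--                 break
--             semesters.append(f"{year}-{term}")
--
--     return semesters
-- ===== SOURCE B (Python) =====
-- def enumerate_semesters(entrance_year: int, last_year: int = 2025, last_term: int = 1) -> list[str]:
--     if entrance_year > last_year:
--         return []
--     n = (last_year - entrance_year) * 3 + min(max(last_term, 0), 3)
--     return [f"{entrance_year + i // 3}-{i % 3 + 1}" for i in range(n)]
-- ===== Notes on version B (the rewrite author's own statement) =====
-- stated objective: simpler
-- what changed: Replaced the nested year/term loops with a break by a single flat index comprehension: the total semester count is computed in closed form ((last_year-entrance_year)*3 + clamp(last_term,0,3)) and each semester recovered from the index by divmod-3 arithmetic.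
import Mathlib
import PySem

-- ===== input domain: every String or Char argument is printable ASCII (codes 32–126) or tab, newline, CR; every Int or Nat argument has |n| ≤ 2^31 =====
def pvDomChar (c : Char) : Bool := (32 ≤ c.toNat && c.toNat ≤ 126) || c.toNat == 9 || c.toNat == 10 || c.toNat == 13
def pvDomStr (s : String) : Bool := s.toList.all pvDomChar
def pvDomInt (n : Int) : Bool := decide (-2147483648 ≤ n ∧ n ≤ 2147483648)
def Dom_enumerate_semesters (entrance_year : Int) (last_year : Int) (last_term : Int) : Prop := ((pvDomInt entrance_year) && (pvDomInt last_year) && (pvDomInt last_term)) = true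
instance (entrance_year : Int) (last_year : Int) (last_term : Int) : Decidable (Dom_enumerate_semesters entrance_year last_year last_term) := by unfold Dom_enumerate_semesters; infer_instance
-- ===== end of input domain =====

-- B replaces the nested loops + break by one flat index pass with divmod arithmetic (objective: simpler).

-- f"{year}-{term}" (shared string formatting, used identically by both ports)
def pvFmt (year term : Int) : String := PySem.Int.toStr year ++ "-" ++ PySem.Int.toStr term

-- ===== PORT A =====
-- inner 'for term in (1, 2, 3)' with its break, as structural recursion over the term list
def pvInnerA (year last_year last_term : Int) : List Int → List String → List String
  | [], acc => acc
  | t :: rest, acc =>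
    if year = last_year ∧ t > last_term then acc
    else pvInnerA year last_year last_term rest (acc ++ [pvFmt year t])

def enumerate_semesters (entrance_year : Int) (last_year : Int) (last_term : Int) : List String :=
  if entrance_year > last_year then []
  else
    (PySem.List.pyRange entrance_year (last_year + 1) 1).foldl
      (fun semesters year => pvInnerA year last_year last_term [1, 2, 3] semesters) []

-- ===== PORT B =====
def enumerate_semesters_alt (entrance_year : Int) (last_year : Int) (last_term : Int) : List String :=
  if entrance_year > last_year then []
  else
    let n : Int := (last_year - entrance_year) * 3 + min (max last_term 0) 3
    (PySem.List.pyRange 0 n 1).map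
      (fun i => pvFmt (entrance_year + PySem.Int.floordiv i 3) (PySem.Int.mod i 3 + 1))

-- ===== PRECONDITION & SPEC =====
def Spec_enumerate_semesters (entrance_year : Int) (last_year : Int) (last_term : Int) (out : List String) : Prop := out = enumerate_semesters_alt entrance_year last_year last_term
instance (entrance_year : Int) (last_year : Int) (last_term : Int) (out : List String) : Decidable (Spec_enumerate_semesters entrance_year last_year last_term out) := by unfold Spec_enumerate_semesters; infer_instance

-- ===== CLAIM (what is proved, stated in full; the proofs are below) =====
def Claim_equal_enumerate_semesters : Prop := ∀ (entrance_year : Int) (last_year : Int) (last_term : Int), Dom_enumerate_semesters entrance_year last_year last_term → Spec_enumerate_semesters entrance_year last_year last_term (enumerate_semesters entrance_year last_year last_term)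

-- ===== LEMMAS AND PROOFS =====

-- canonical form both ports are reduced to
def pvCanon (ey : Int) (m c : Nat) : List String :=
  (List.range (3 * m + c)).map (fun i => pvFmt (ey + (i / 3 : Nat)) ((i % 3 : Nat) + 1))

-- the list the inner term-loop (with its break) contributes for one year
def pvYear (last_year last_term year : Int) : List String :=
  if year = last_year
  then (List.range (min (max last_term 0) 3).toNat).map (fun t => pvFmt year ((t : Nat) + 1))
  else [pvFmt year 1, pvFmt year 2, pvFmt year 3]

theorem pvInnerA_eq (year last_year last_term : Int) (acc : List String) :
    pvInnerA year last_year last_term [1, 2, 3] acc = acc ++ pvYear last_year last_term year := by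
  unfold pvYear
  by_cases h : year = last_year
  · subst h
    simp only [if_pos]
    rcases lt_trichotomy last_term 1 with h1 | h1 | h1
    · have : (min (max last_term 0) 3).toNat = 0 := by omega
      rw [this]
      simp [pvInnerA, show (1 : Int) > last_term from by omega]
    · subst h1
      have : (min (max (1:Int) 0) 3).toNat = 1 := by decide
      rw [this]
      simp [pvInnerA, List.range_succ]
    · rcases lt_trichotomy last_term 2 with h2 | h2 | h2
      · have : (min (max last_term 0) 3).toNat = 1 := by omega
        rw [this]
        simp [pvInnerA, show ¬((1 : Int) > last_term) from by omega,
          show (2 : Int) > last_term from by omega, List.range_succ]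
      · subst h2
        have : (min (max (2:Int) 0) 3).toNat = 2 := by decide
        rw [this]
        simp [pvInnerA, show ¬((1 : Int) > 2) from by omega, List.range_succ]
      · have : (min (max last_term 0) 3).toNat = 3 := by omega
        rw [this]
        simp [pvInnerA, show ¬((1 : Int) > last_term) from by omega,
          show ¬((2 : Int) > last_term) from by omega,
          show ¬((3 : Int) > last_term) from by omega, List.range_succ]
  · simp [pvInnerA, h]

theorem pvCanon_zero (ey : Int) (c : Nat) (hc : c ≤ 3) :
    pvCanon ey 0 c = (List.range c).map (fun t => pvFmt ey ((t : Nat) + 1)) := by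
  unfold pvCanon
  rw [show 3 * 0 + c = c from by omega]
  apply List.map_congr_left
  intro i hi
  have hi3 : i < 3 := by have := List.mem_range.mp hi; omega
  rw [Nat.div_eq_of_lt hi3, Nat.mod_eq_of_lt hi3]
  simp

theorem pvCanon_succ (ey : Int) (k c : Nat) :
    pvCanon ey (k + 1) c = [pvFmt ey 1, pvFmt ey 2, pvFmt ey 3] ++ pvCanon (ey + 1) k c := by
  unfold pvCanon
  rw [show 3 * (k + 1) + c = 3 + (3 * k + c) from by omega, List.range_add,
    List.map_append, List.map_map]
  congr 1
  · simp [List.range_succ]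
  · apply List.map_congr_left
    intro i _
    simp only [Function.comp_apply]
    rw [show (3 + i) / 3 = i / 3 + 1 from by omega, show (3 + i) % 3 = i % 3 from by omega]
    congr 1
    push_cast
    ring

-- A-side: the year fold equals the canonical form
theorem pvA_eq_canon (last_year last_term : Int) (ey : Int) (m : Nat)
    (hm : last_year = ey + m) :
    (PySem.List.pyRange ey (last_year + 1) 1).foldl
      (fun semesters year => pvInnerA year last_year last_term [1, 2, 3] semesters) [] =
      pvCanon ey m (min (max last_term 0) 3).toNat := by
  have hfun : (fun (semesters : List String) year =>
      pvInnerA year last_year last_term [1, 2, 3] semesters) =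
      fun semesters year => semesters ++ pvYear last_year last_term year :=
    funext fun s => funext fun y => pvInnerA_eq y last_year last_term s
  rw [hfun, PySem.List.foldl_append_eq_flatMap, List.nil_append]
  induction m generalizing ey with
  | zero =>
    have hey : ey = last_year := by omega
    subst hey
    rw [PySem.List.pyRange_one_singleton]
    simp only [List.flatMap_cons, List.flatMap_nil, List.append_nil]
    rw [pvCanon_zero ey _ (by omega)]
    unfold pvYear
    rw [if_pos rfl]
  | succ k ih =>
    rw [PySem.List.pyRange_one_cons (by omega : ey < last_year + 1), List.flatMap_cons,
      ih (ey + 1) (by omega), pvCanon_succ]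
    congr 1
    unfold pvYear
    rw [if_neg (by omega : ¬ ey = last_year)]

-- B-side: the flat comprehension equals the canonical form
theorem pvB_eq_canon (ey : Int) (m c : Nat) :
    (PySem.List.pyRange 0 ((m : Int) * 3 + (c : Int)) 1).map
      (fun i => pvFmt (ey + PySem.Int.floordiv i 3) (PySem.Int.mod i 3 + 1)) =
      pvCanon ey m c := by
  have hn : ((m : Int) * 3 + (c : Int)) = ((3 * m + c : Nat) : Int) := by push_cast; ring
  rw [hn, PySem.List.pyRange_zero_natCast, List.map_map]
  unfold pvCanon
  apply List.map_congr_left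
  intro i _
  simp only [Function.comp_apply]
  congr 1
  · congr 1
    exact_mod_cast PySem.Int.floordiv_natCast i 3
  · congr 1
    exact_mod_cast PySem.Int.mod_natCast i 3

-- ===== VERDICT (by name: the statement is the Claim_ definition above) =====
theorem enumerate_semesters_spec : Claim_equal_enumerate_semesters := by
  intro ey ly lt _
  unfold Spec_enumerate_semesters enumerate_semesters enumerate_semesters_alt
  by_cases h : ey > ly
  · simp [h]
  · rw [if_neg h, if_neg h]
    rw [pvA_eq_canon ly lt ey (ly - ey).toNat (by omega)]
    have hlt : (ly - ey) * 3 + min (max lt 0) 3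
        = (((ly - ey).toNat : Int)) * 3 + (((min (max lt 0) 3).toNat : Int)) := by omega
    simp only [hlt]
    exact (pvB_eq_canon ey (ly - ey).toNat (min (max lt 0) 3).toNat).symm
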